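-- pv_equiv track=rewrite | github.com/ysoftman/codingtest | tryhelloworld/level2_get_day_name.py | getDayName
-- ===== SOURCE A (Python) =====
-- def getDayName(a, b):
--     answer = ""
--
--     mday = 0
--     week = ["THU", "FRI", "SAT", "SUN", "MON", "TUE", "WED"]
--     fullmonth = [1, 3, 5, 7, 8, 10, 12]
--     for i in range(1, a):
--         if i == 2:
--             mday += 29
--         elif i in fullmonth:
--             mday += 31
--         else:
--             mday += 30
--     # yearday 구하기
--     yeardays = mday + b
--     answer = week[yeardays % 7]
--     return answer
-- ===== SOURCE B (Python) =====
-- LONG_MONTHS = [1, 3, 5, 7, 8, 10, 12]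
-- WEEK = ["THU", "FRI", "SAT", "SUN", "MON", "TUE", "WED"]
--
-- def getDayName(a, b):
--     # days elapsed before month a: 30 per month, +1 per 31-day month, -1 for February (29 days)
--     months = max(a - 1, 0)
--     long_count = sum(1 for m in LONG_MONTHS if m <= months)
--     total = 30 * months + long_count - (months >= 2)
--     return WEEK[(total + b) % 7]
-- ===== Notes on version B (the rewrite author's own statement) =====
-- stated objective: faster
-- what changed: Replaced the per-month accumulation loop over range(1,a) with closed-form calendar arithmetic: 30 days per elapsed month, plus one per 31-day month passed, minus one for February, so the day total is computed in O(1) instead of O(a).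
import Mathlib
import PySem

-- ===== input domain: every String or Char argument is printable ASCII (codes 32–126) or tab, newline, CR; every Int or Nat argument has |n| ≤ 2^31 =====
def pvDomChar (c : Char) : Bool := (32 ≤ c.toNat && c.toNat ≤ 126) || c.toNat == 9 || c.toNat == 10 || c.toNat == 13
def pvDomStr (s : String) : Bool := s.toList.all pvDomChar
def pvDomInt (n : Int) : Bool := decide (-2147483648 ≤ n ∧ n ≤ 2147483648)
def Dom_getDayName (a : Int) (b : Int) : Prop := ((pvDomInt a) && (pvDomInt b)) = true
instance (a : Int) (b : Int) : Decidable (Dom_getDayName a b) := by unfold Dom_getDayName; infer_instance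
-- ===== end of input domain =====

-- B replaces A's per-month accumulation loop by closed-form calendar arithmetic
-- (30 days per elapsed month, +1 per long month passed, -1 for February): O(1) instead of O(a).

-- ===== PORT A =====
-- the loop body: if i == 2: mday += 29 elif i in fullmonth: mday += 31 else: mday += 30
def gdnStep (mday : Int) (i : Int) : Int :=
  if i = 2 then mday + 29
  else if ([1, 3, 5, 7, 8, 10, 12] : List Int).contains i then mday + 31
  else mday + 30

def getDayName (a : Int) (b : Int) : String :=
  let week : List String := ["THU", "FRI", "SAT", "SUN", "MON", "TUE", "WED"]
  let mday : Int := (PySem.List.pyRange 1 a 1).foldl gdnStep 0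
  let yeardays : Int := mday + b
  PySem.List.pyGetD week (PySem.Int.mod yeardays 7) ""

-- ===== PORT B =====
def getDayName_alt (a : Int) (b : Int) : String :=
  let week : List String := ["THU", "FRI", "SAT", "SUN", "MON", "TUE", "WED"]
  let months : Int := max (a - 1) 0
  -- sum(1 for m in LONG_MONTHS if m <= months)
  let longCount : Int := (([1, 3, 5, 7, 8, 10, 12] : List Int).filter (fun m => decide (m ≤ months))).length
  -- (months >= 2) as Python's bool-to-int
  let total : Int := 30 * months + longCount - (if 2 ≤ months then 1 else 0)
  PySem.List.pyGetD week (PySem.Int.mod (total + b) 7) ""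

-- ===== PRECONDITION & SPEC =====
def Spec_getDayName (a : Int) (b : Int) (out : String) : Prop := out = getDayName_alt a b
instance (a : Int) (b : Int) (out : String) : Decidable (Spec_getDayName a b out) := by unfold Spec_getDayName; infer_instance

-- ===== CLAIM (what is proved, stated in full; the proofs are below) =====
def Claim_equal_getDayName : Prop := ∀ (a : Int) (b : Int), Dom_getDayName a b → Spec_getDayName a b (getDayName a b)

-- ===== LEMMAS AND PROOFS =====

def gdnLoop (a : Int) : Int := (PySem.List.pyRange 1 a 1).foldl gdnStep 0

def gdnTotal (a : Int) : Int :=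
  let months : Int := max (a - 1) 0
  let longCount : Int := (([1, 3, 5, 7, 8, 10, 12] : List Int).filter (fun m => decide (m ≤ months))).length
  30 * months + longCount - (if 2 ≤ months then 1 else 0)

theorem gdnLoop_of_le_one {a : Int} (h : a ≤ 1) : gdnLoop a = 0 := by
  simp [gdnLoop, PySem.List.pyRange_one_eq_nil h]

theorem gdnLoop_of_ge_13 {a : Int} (h : 13 ≤ a) : gdnLoop a = 366 + 30 * (a - 13) := by
  induction a, h using Int.le_induction with
  | base => decide
  | succ n hn ih =>
      have hr : PySem.List.pyRange 1 (n + 1) 1 = PySem.List.pyRange 1 n 1 ++ [n] :=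
        PySem.List.pyRange_one_succ_right (by omega)
      have hstep : gdnStep (gdnLoop n) n = gdnLoop n + 30 := by
        have h2 : n ≠ 2 := by omega
        simp [gdnStep, h2]
        omega
      simp only [gdnLoop, hr, List.foldl_append, List.foldl_cons, List.foldl_nil]
      rw [show (PySem.List.pyRange 1 n 1).foldl gdnStep 0 = gdnLoop n from rfl, hstep, ih]
      ring

theorem gdnTotal_eq_loop (a : Int) : gdnTotal a = gdnLoop a := by
  by_cases h1 : a ≤ 1
  · have hm : max (a - 1) 0 = 0 := by omega
    rw [gdnLoop_of_le_one h1]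
    simp [gdnTotal, hm]
  · by_cases h2 : a ≤ 13
    · have h1' : (2 : Int) ≤ a := by omega
      interval_cases a <;> decide
    · have hm : max (a - 1) 0 = a - 1 := by omega
      have hfilter :
          (([1, 3, 5, 7, 8, 10, 12] : List Int).filter (fun m => decide (m ≤ a - 1)))
            = [1, 3, 5, 7, 8, 10, 12] := by
        simp [List.filter_eq_self]
        omega
      rw [gdnLoop_of_ge_13 (by omega)]
      simp only [gdnTotal, hm, hfilter]
      rw [if_pos (by omega : (2:Int) ≤ a - 1)]
      simp
      omega

-- ===== VERDICT (by name: the statement is the Claim_ definition above) =====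
theorem getDayName_spec : Claim_equal_getDayName := by
  intro a b _
  unfold Spec_getDayName getDayName getDayName_alt
  rw [show (PySem.List.pyRange 1 a 1).foldl gdnStep 0 = gdnLoop a from rfl,
      ← gdnTotal_eq_loop a]
  rfl
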